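-- pv_equiv track=rewrite | github.com/Ayamatr1x/MathAiAgent | backend/dspyfeedback.py | _parse_solution_steps
-- ===== SOURCE A (Python) =====
-- from typing import List, Dict, Optional
--
-- def _parse_solution_steps(solution_text: str) -> List[str]:
--     """Parse solution text into discrete steps"""
--     lines = solution_text.split('\n')
--     steps = []
--     current_step = ""
--
--     for line in lines:
--         line = line.strip()
--         if not line:
--             continue
--
--         # Look for step indicators
--         if any(indicator in line.lower() for indicator in ['step', 'first', 'next', 'then', 'finally']):
--             if current_step:
--                 steps.append(current_step.strip())
--             current_step = line
--         else:
--             current_step += " " + line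
--
--     if current_step:
--         steps.append(current_step.strip())
--
--     return steps if steps else [solution_text]
-- ===== SOURCE B (Python) =====
-- from typing import List
--
--
-- def _is_indicator(line: str) -> bool:
--     low = line.lower()
--     return any(k in low for k in ('step', 'first', 'next', 'then', 'finally'))
--
--
-- def _split_at_indicator(lines: List[str]):
--     """Split lines at the first indicator line: (before, from-there-on)."""
--     for i, ln in enumerate(lines):
--         if _is_indicator(ln):
--             return lines[:i], lines[i:]
--     return lines, []
--
--
-- def _groups(lines: List[str]) -> List[str]:
--     """lines is non-empty; the first line always starts a group."""
--     pre, post = _split_at_indicator(lines[1:])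
--     step = ' '.join([lines[0]] + pre)
--     if post:
--         return [step] + _groups(post)
--     return [step]
--
--
-- def _parse_solution_steps(solution_text: str) -> List[str]:
--     cleaned = [ln.strip() for ln in solution_text.split('\n')]
--     cleaned = [ln for ln in cleaned if ln]
--     if not cleaned:
--         return [solution_text]
--     return _groups(cleaned)
-- ===== Notes on version B (the rewrite author's own statement) =====
-- stated objective: alternative
-- what changed: Replaces A's single accumulator loop (growing a current_step string and flushing it on each indicator) by a pre-pass that builds the cleaned line list once and then recursively slices it into groups at indicator lines, joining each group with a single space.
import Mathlib
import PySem

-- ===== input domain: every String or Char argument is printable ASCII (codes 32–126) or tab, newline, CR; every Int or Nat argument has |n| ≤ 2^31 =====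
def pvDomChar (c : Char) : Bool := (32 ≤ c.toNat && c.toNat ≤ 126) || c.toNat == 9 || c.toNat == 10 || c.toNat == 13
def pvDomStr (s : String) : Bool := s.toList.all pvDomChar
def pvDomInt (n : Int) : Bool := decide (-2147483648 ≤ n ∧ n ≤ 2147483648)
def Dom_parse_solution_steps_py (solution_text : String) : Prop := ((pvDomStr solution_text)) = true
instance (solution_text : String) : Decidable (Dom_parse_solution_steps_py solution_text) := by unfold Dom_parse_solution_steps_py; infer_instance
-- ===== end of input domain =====

-- B replaces A's accumulator loop by a cleaned-lines pre-pass plus recursive slicing at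
-- indicator lines (objective: alternative decomposition, same cost).

-- ===== PORT A =====
-- Strings are handled as `List Char` via the PySem.Chars primitives (exact on the ASCII domain);
-- the loop `for line in lines` with state (steps, current_step) is a foldl of its body pvLineStep.
def pvLineStep (acc : List (List Char) × List Char) (rawline : List Char) :
    List (List Char) × List Char :=
  let line := PySem.Chars.strip rawline
  if line = [] then acc
  else if (["step", "first", "next", "then", "finally"].map String.toList).any
            (fun ind => PySem.Chars.isIn ind (PySem.Chars.lower line)) then
    ((if acc.2 ≠ [] then acc.1 ++ [PySem.Chars.strip acc.2] else acc.1), line)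
  else (acc.1, acc.2 ++ ' ' :: line)

def parse_solution_steps_py (solution_text : String) : List String :=
  let lines := PySem.Chars.splitOn solution_text.toList ['\n']
  let fin := lines.foldl pvLineStep ([], [])
  let steps := if fin.2 ≠ [] then fin.1 ++ [PySem.Chars.strip fin.2] else fin.1
  if steps ≠ [] then steps.map String.ofList else [solution_text]

-- ===== PORT B =====
def pvIsIndicator (line : List Char) : Bool :=
  (["step", "first", "next", "then", "finally"].map String.toList).any
    (fun k => PySem.Chars.isIn k (PySem.Chars.lower line))

-- Source B's _split_at_indicator: the linear scan returning (lines[:i], lines[i:]) at the first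
-- indicator is exactly takeWhile/dropWhile on the negated test.
def pvGroups : List (List Char) → List (List Char)
  | [] => []
  | l :: rest =>
    let pre := rest.takeWhile (fun x => !pvIsIndicator x)
    let post := rest.dropWhile (fun x => !pvIsIndicator x)
    let step := PySem.Chars.join [' '] (l :: pre)
    if post = [] then [step]
    else step :: pvGroups post
termination_by lines => lines.length
decreasing_by
  simpa using Nat.lt_succ_of_le (rest.length_dropWhile_le (fun x => !pvIsIndicator x))

def parse_solution_steps_py_alt (solution_text : String) : List String :=
  let cleaned := ((PySem.Chars.splitOn solution_text.toList ['\n']).map PySem.Chars.strip).filter (· ≠ [])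
  if cleaned = [] then [solution_text]
  else (pvGroups cleaned).map String.ofList

-- ===== PRECONDITION & SPEC =====
def Spec_parse_solution_steps_py (solution_text : String) (out : List String) : Prop := out = parse_solution_steps_py_alt solution_text
instance (solution_text : String) (out : List String) : Decidable (Spec_parse_solution_steps_py solution_text out) := by unfold Spec_parse_solution_steps_py; infer_instance

-- ===== CLAIM (what is proved, stated in full; the proofs are below) =====
def Claim_equal_parse_solution_steps_py : Prop := ∀ (solution_text : String), Dom_parse_solution_steps_py solution_text → Spec_parse_solution_steps_py solution_text (parse_solution_steps_py solution_text)

-- ===== LEMMAS AND PROOFS =====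

-- A's loop body acting on an already-stripped, non-empty line (defeq to the second half of pvLineStep)
def pvBodyA (acc : List (List Char) × List Char) (line : List Char) : List (List Char) × List Char :=
  if pvIsIndicator line then
    ((if acc.2 ≠ [] then acc.1 ++ [PySem.Chars.strip acc.2] else acc.1), line)
  else (acc.1, acc.2 ++ ' ' :: line)

lemma pvLineStep_eq (acc : List (List Char) × List Char) (raw : List Char) :
    pvLineStep acc raw
      = if PySem.Chars.strip raw = [] then acc else pvBodyA acc (PySem.Chars.strip raw) := rfl

lemma pvFold_skip_empty (lines : List (List Char)) (st : List (List Char) × List Char) :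
    lines.foldl pvLineStep st
    = ((lines.map PySem.Chars.strip).filter (· ≠ [])).foldl pvBodyA st := by
  induction lines generalizing st with
  | nil => rfl
  | cons l ls ih =>
    simp only [List.foldl_cons, List.map_cons, List.filter_cons, pvLineStep_eq]
    by_cases h : PySem.Chars.strip l = []
    · simp [h, ih]
    · simp [h, ih]

-- a "clean" line: non-empty, no leading and no trailing whitespace
def pvClean (c : List Char) : Prop :=
  c ≠ [] ∧ c.dropWhile PySem.Chars.isspace = c ∧ c.reverse.dropWhile PySem.Chars.isspace = c.reverse

-- dropWhile leaves a list alone iff it leaves any extension of it alone (head test only)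
lemma pvDropWhile_append (p : Char → Bool) (a x : List Char)
    (hl : a.dropWhile p = a) (ha : a ≠ []) : (a ++ x).dropWhile p = a ++ x := by
  rw [List.dropWhile_eq_self_iff] at *
  intro h
  rw [List.getElem_append_left (by simpa using List.length_pos_iff.mpr ha)]
  exact hl (by simpa using List.length_pos_iff.mpr ha)

lemma pvDropWhile_prefix (p : Char → Bool) (u s : List Char)
    (hu : u.dropWhile p = u) (hs : s <+: u) : s.dropWhile p = s := by
  rw [List.dropWhile_eq_self_iff] at *
  intro h
  rw [hs.getElem h]
  exact hu (h.trans_le hs.length_le)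

lemma pvClean_strip (x : List Char) (h : PySem.Chars.strip x ≠ []) : pvClean (PySem.Chars.strip x) := by
  have hu : (x.dropWhile PySem.Chars.isspace).dropWhile PySem.Chars.isspace
      = x.dropWhile PySem.Chars.isspace := List.dropWhile_idempotent _ _
  have hpref : PySem.Chars.strip x <+: x.dropWhile PySem.Chars.isspace := by
    have hsfx : (x.dropWhile PySem.Chars.isspace).reverse.dropWhile PySem.Chars.isspace
        <:+ (x.dropWhile PySem.Chars.isspace).reverse := List.dropWhile_suffix _
    have := List.reverse_prefix.mpr hsfx
    simpa [PySem.Chars.strip, PySem.Chars.lstrip, PySem.Chars.rstrip] using this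
  refine ⟨h, pvDropWhile_prefix _ _ _ hu hpref, ?_⟩
  simp [PySem.Chars.strip, PySem.Chars.lstrip, PySem.Chars.rstrip, List.dropWhile_idempotent]

lemma pvStrip_clean (g : List Char) (hg : pvClean g) : PySem.Chars.strip g = g := by
  simp [PySem.Chars.strip, PySem.Chars.lstrip, PySem.Chars.rstrip, hg.2.1, hg.2.2]

lemma pvStrip_pad_clean (pad g : List Char) (hpad : pad = [] ∨ pad = [' ']) (hg : pvClean g) :
    PySem.Chars.strip (pad ++ g) = g := by
  rcases hpad with h | h <;> subst h
  · simpa using pvStrip_clean g hg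
  · have h1 : (' ' :: g).dropWhile PySem.Chars.isspace = g.dropWhile PySem.Chars.isspace := by
      rw [List.dropWhile_cons]
      simp [show PySem.Chars.isspace ' ' = true from rfl]
    show PySem.Chars.strip (' ' :: g) = g
    simp [PySem.Chars.strip, PySem.Chars.lstrip, PySem.Chars.rstrip, h1, hg.2.1, hg.2.2]

lemma pvJoin_singleton (c : List Char) : PySem.Chars.join [' '] [c] = c := by
  simp [PySem.Chars.join, List.intercalate]

lemma pvJoin_cons₂ (a b : List Char) (t : List (List Char)) :
    PySem.Chars.join [' '] (a :: b :: t) = a ++ ' ' :: PySem.Chars.join [' '] (b :: t) := by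
  simp [PySem.Chars.join, List.intercalate, List.intersperse]

lemma pvJoin_append_singleton (grp : List (List Char)) (hne : grp ≠ []) (c : List Char) :
    PySem.Chars.join [' '] (grp ++ [c]) = PySem.Chars.join [' '] grp ++ ' ' :: c := by
  induction grp with
  | nil => simp at hne
  | cons a t ih =>
    cases t with
    | nil => simp [pvJoin_cons₂]
    | cons b bs =>
      simp only [List.cons_append]
      rw [pvJoin_cons₂, ← List.cons_append, ih (by simp), pvJoin_cons₂]
      simp

-- join of a chain of clean lines is itself clean
lemma pvClean_join (grp : List (List Char)) (hne : grp ≠ []) (hc : ∀ c ∈ grp, pvClean c) :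
    pvClean (PySem.Chars.join [' '] grp) := by
  induction grp with
  | nil => simp at hne
  | cons a t ih =>
    cases t with
    | nil => simpa [pvJoin_singleton] using hc a (by simp)
    | cons b bs =>
      have ha : pvClean a := hc a (by simp)
      have hj : pvClean (PySem.Chars.join [' '] (b :: bs)) :=
        ih (by simp) (fun c hcm => hc c (by simp [hcm]))
      rw [pvJoin_cons₂]
      refine ⟨by simp [ha.1], ?_, ?_⟩
      · exact pvDropWhile_append _ _ _ ha.2.1 ha.1
      · rw [List.reverse_append, List.reverse_cons]
        rw [List.append_assoc]
        refine pvDropWhile_append _ _ _ hj.2.2 (by simp [hj.1])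

-- the continuation of B: an open group `grp` followed by the remaining cleaned lines
def pvContGroups (grp : List (List Char)) (cs : List (List Char)) : List (List Char) :=
  let pre := cs.takeWhile (fun x => !pvIsIndicator x)
  let post := cs.dropWhile (fun x => !pvIsIndicator x)
  if post = [] then [PySem.Chars.join [' '] (grp ++ pre)]
  else PySem.Chars.join [' '] (grp ++ pre) :: pvGroups post

lemma pvGroups_cons (l : List Char) (rest : List (List Char)) :
    pvGroups (l :: rest) = pvContGroups [l] rest := by
  rw [pvGroups, pvContGroups]
  simp only [List.singleton_append]

lemma pvContGroups_ne_nil (grp cs : List (List Char)) : pvContGroups grp cs ≠ [] := by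
  rw [pvContGroups]
  split <;> simp

def pvFinalize (st : List (List Char) × List Char) : List (List Char) :=
  if st.2 ≠ [] then st.1 ++ [PySem.Chars.strip st.2] else st.1

-- the main loop invariant: A's accumulator equals (padding ++) the join of the open group
lemma pvMain (cs : List (List Char)) (steps : List (List Char)) (grp : List (List Char)) (pad : List Char)
    (hcs : ∀ c ∈ cs, pvClean c) (hgrp : grp ≠ []) (hg : ∀ c ∈ grp, pvClean c)
    (hpad : pad = [] ∨ pad = [' ']) :
    pvFinalize (cs.foldl pvBodyA (steps, pad ++ PySem.Chars.join [' '] grp))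
      = steps ++ pvContGroups grp cs := by
  induction cs generalizing steps grp pad with
  | nil =>
    have hj := pvClean_join grp hgrp hg
    have hcur : pad ++ PySem.Chars.join [' '] grp ≠ [] := by simp [hj.1]
    simp [pvFinalize, hcur, pvStrip_pad_clean pad _ hpad hj, pvContGroups]
  | cons c cs' ih =>
    have hc : pvClean c := hcs c (by simp)
    have hj := pvClean_join grp hgrp hg
    have hcur : pad ++ PySem.Chars.join [' '] grp ≠ [] := by simp [hj.1]
    rw [List.foldl_cons]
    by_cases hind : pvIsIndicator c
    · have hb : pvBodyA (steps, pad ++ PySem.Chars.join [' '] grp) c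
          = (steps ++ [PySem.Chars.join [' '] grp], ([] : List Char) ++ PySem.Chars.join [' '] [c]) := by
        simp [pvBodyA, hind, hcur, pvStrip_pad_clean pad _ hpad hj]
      rw [hb, ih _ _ _ (fun x hx => hcs x (by simp [hx])) (by simp) (by simpa using hc) (Or.inl rfl)]
      simp only [pvContGroups, List.takeWhile_cons, List.dropWhile_cons, hind]
      simp [pvGroups_cons, pvContGroups, List.dropWhile_eq_nil_iff]
    · have hb : pvBodyA (steps, pad ++ PySem.Chars.join [' '] grp) c
          = (steps, pad ++ PySem.Chars.join [' '] (grp ++ [c])) := by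
        simp [pvBodyA, hind, pvJoin_append_singleton grp hgrp c]
      rw [hb, ih _ _ _ (fun x hx => hcs x (by simp [hx])) (by simp [hgrp])
            (fun x hx => by rcases List.mem_append.mp hx with h | h
                            exacts [hg x h, by simpa using (List.mem_singleton.mp h ▸ hc)]) hpad]
      simp only [pvContGroups, List.takeWhile_cons, List.dropWhile_cons, hind]
      simp

-- ===== VERDICT (by name: the statement is the Claim_ definition above) =====
theorem parse_solution_steps_py_spec : Claim_equal_parse_solution_steps_py := by
  intro solution_text _
  unfold Spec_parse_solution_steps_py parse_solution_steps_py parse_solution_steps_py_alt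
  dsimp only
  rw [pvFold_skip_empty]
  set cleaned := (((PySem.Chars.splitOn solution_text.toList ['\n']).map PySem.Chars.strip).filter (· ≠ [])) with hcl
  have hclean : ∀ c ∈ cleaned, pvClean c := by
    intro c hcm
    rw [hcl, List.mem_filter] at hcm
    obtain ⟨hm, hne⟩ := hcm
    obtain ⟨x, _, hx⟩ := List.mem_map.mp hm
    exact hx ▸ pvClean_strip x (by simpa using hx ▸ (by simpa using hne))
  clear_value cleaned
  cases cleaned with
  | nil => simp
  | cons c cs =>
    have hc : pvClean c := hclean c (List.mem_cons_self ..)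
    have h1 : pvBodyA ([], []) c = ([], (if pvIsIndicator c then ([] : List Char) else [' ']) ++ PySem.Chars.join [' '] [c]) := by
      by_cases hind : pvIsIndicator c <;> simp [pvBodyA, hind]
    rw [List.foldl_cons, h1]
    have hfin := pvMain cs [] [c] (if pvIsIndicator c then ([] : List Char) else [' '])
      (fun x hx => hclean x (List.mem_cons_of_mem c hx)) (by simp) (by simpa using hc)
      (by by_cases hind : pvIsIndicator c <;> simp [hind])
    simp only [pvFinalize, List.nil_append] at hfin
    rw [hfin]
    simp [pvContGroups_ne_nil, pvGroups_cons]
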